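-- pv_equiv track=rewrite | github.com/KartoonYoko/6_term | Computer-graphics/Computer-graphics/lab 14/lab 14/work_with_max_and_min.py | list_indices_max_without_min
-- ===== SOURCE A (Python) =====
-- def list_indices_max_without_min(data, count = 1)-> list:
--     """ Search some given number indices max elements """
--     if count > len(data):
--         raise ValueError("Quantity maximums must be less or equal size data!!!")
--     indexes = []
--     min_val = min(data) - 1
--     while count > 0:
--         mi = -1
--         m = min_val
--         for i in range(len(data)):
--             if data[i] > m and i not in indexes:
--                 m = data[i]
--                 mi = i
--         if m != min_val + 1:
--             indexes += [mi]
--         count -= 1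
--     return indexes
-- ===== SOURCE B (Python) =====
-- def list_indices_max_without_min(data, count = 1) -> list:
--     """ Search some given number indices max elements """
--     if count > len(data):
--         raise ValueError("Quantity maximums must be less or equal size data!!!")
--     lo = min(data)
--     order = sorted(range(len(data)), key=lambda i: (-data[i], i))
--     return [i for i in order[:max(count, 0)] if data[i] > lo]
-- ===== Notes on version B (the rewrite author's own statement) =====
-- stated objective: faster
-- what changed: Replaces the repeated full-array selection scans (one O(n)-scan with an O(count) membership test per requested maximum) by a single sort of the indices on the key (-value, index) followed by taking the first count indices whose value exceeds the global minimum.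
import Mathlib
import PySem

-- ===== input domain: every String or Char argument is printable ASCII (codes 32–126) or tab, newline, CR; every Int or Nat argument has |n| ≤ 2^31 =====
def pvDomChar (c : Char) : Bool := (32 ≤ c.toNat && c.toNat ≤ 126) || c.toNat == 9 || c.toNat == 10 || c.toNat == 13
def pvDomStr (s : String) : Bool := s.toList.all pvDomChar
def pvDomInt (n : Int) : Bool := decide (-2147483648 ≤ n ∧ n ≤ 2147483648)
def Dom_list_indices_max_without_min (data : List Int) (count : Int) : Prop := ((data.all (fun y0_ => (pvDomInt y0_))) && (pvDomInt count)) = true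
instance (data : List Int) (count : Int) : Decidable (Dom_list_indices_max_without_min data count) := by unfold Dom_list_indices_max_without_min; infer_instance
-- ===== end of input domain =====

-- B replaces A's repeated selection scans by one sort of the indices on the key (-value, index)
-- and takes the first `count` indices whose value exceeds the global minimum (return values only; neither mutates).

-- ===== PORT A =====
-- inner 'for i in range(len(data))' scan of A, state (mi, m)
def pvStepA (data : List Int) (indexes : List Int) (st : Int × Int) (i : Int) : Int × Int :=
  if PySem.List.pyGetD data i 0 > st.2 ∧ ¬ (i ∈ indexes) then (i, PySem.List.pyGetD data i 0) else st

-- A's 'while count > 0' loop, one fuel unit per iteration (count.toNat iterations)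
def pvLoopA (data : List Int) (minVal : Int) : Nat → List Int → List Int
  | 0, indexes => indexes
  | Nat.succ c, indexes =>
    let st := (PySem.List.pyRange 0 (PySem.List.len data) 1).foldl (pvStepA data indexes) (-1, minVal)
    pvLoopA data minVal c (if st.2 ≠ minVal + 1 then indexes ++ [st.1] else indexes)

def list_indices_max_without_min (data : List Int) (count : Int) : List Int :=
  if count > PySem.List.len data then []   -- Python raises ValueError here; excluded by Pre_
  else match PySem.List.min? data (fun x => x) with
  | none => []                             -- min([]) raises ValueError; excluded by Pre_
  | some mn => pvLoopA data (mn - 1) count.toNat []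

-- ===== PORT B =====
def list_indices_max_without_min_alt (data : List Int) (count : Int) : List Int :=
  if count > PySem.List.len data then []   -- Python raises ValueError here; excluded by Pre_
  else match PySem.List.min? data (fun x => x) with
  | none => []                             -- min([]) raises ValueError; excluded by Pre_
  | some lo =>
    let order := PySem.List.sorted2 (PySem.List.pyRange 0 (PySem.List.len data) 1)
      (fun i => -(PySem.List.pyGetD data i 0)) (fun i => i) false
    (PySem.List.slice order none (some (max count 0))).filter
      (fun i => decide (lo < PySem.List.pyGetD data i 0))

-- ===== PRECONDITION & SPEC =====
-- Pre_ excludes exactly the inputs where A raises ValueError: empty data (the min() call raises)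
-- and count > len(data) (A's explicit guard).
def Pre_list_indices_max_without_min (data : List Int) (count : Int) : Prop :=
  data ≠ [] ∧ count ≤ (data.length : Int)
instance (data : List Int) (count : Int) : Decidable (Pre_list_indices_max_without_min data count) := by unfold Pre_list_indices_max_without_min; infer_instance

def pvWitness_list_indices_max_without_min : List Int × Int := ([1, 0, 2], 2)

def Spec_list_indices_max_without_min (data : List Int) (count : Int) (out : List Int) : Prop := out = list_indices_max_without_min_alt data count
instance (data : List Int) (count : Int) (out : List Int) : Decidable (Spec_list_indices_max_without_min data count out) := by unfold Spec_list_indices_max_without_min; infer_instance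

-- ===== CLAIM (what is proved, stated in full; the proofs are below) =====
def Claim_equal_list_indices_max_without_min : Prop := ∀ (data : List Int) (count : Int), Dom_list_indices_max_without_min data count → Pre_list_indices_max_without_min data count → Spec_list_indices_max_without_min data count (list_indices_max_without_min data count)

-- ===== LEMMAS AND PROOFS =====

-- value at index i
def pvD (data : List Int) (i : Int) : Int := PySem.List.pyGetD data i 0

-- the index order B sorts into
def pvOrder (data : List Int) : List Int :=
  PySem.List.sorted2 (PySem.List.pyRange 0 (PySem.List.len data) 1)
    (fun i => -(PySem.List.pyGetD data i 0)) (fun i => i) false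

-- the boolean comparator sorted2 uses for that call, and its propositional form
def pvLtB (data : List Int) (a b : Int) : Bool :=
  decide ((-(PySem.List.pyGetD data a 0)) < (-(PySem.List.pyGetD data b 0))) ||
  (!decide ((-(PySem.List.pyGetD data b 0)) < (-(PySem.List.pyGetD data a 0))) && decide (a < b))

def pvR (data : List Int) (a b : Int) : Prop :=
  pvD data b < pvD data a ∨ (pvD data b ≤ pvD data a ∧ a < b)

-- how many leading entries of the order have value above the minimum lo
def pvG (data : List Int) (lo : Int) : Nat :=
  ((pvOrder data).takeWhile (fun i => decide (lo < pvD data i))).length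

lemma pvLtB_iff (data : List Int) (a b : Int) : pvLtB data a b = true ↔ pvR data a b := by
  unfold pvLtB pvR pvD
  simp only [Bool.or_eq_true, Bool.and_eq_true, Bool.not_eq_true', decide_eq_true_eq,
    decide_eq_false_iff_not]
  omega

lemma pvOrder_eq_foldl (data : List Int) :
    pvOrder data = (PySem.List.pyRange 0 (PySem.List.len data) 1).foldl
      (fun acc x => PySem.List.insertBy (pvLtB data) x acc) [] := rfl

lemma insertBy_pairwise_R (data : List Int) (x : Int) :
    ∀ (ys : List Int), ys.Pairwise (pvR data) → (∀ y ∈ ys, x ≠ y) →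
    (PySem.List.insertBy (pvLtB data) x ys).Pairwise (pvR data)
  | [], _, _ => by simp [PySem.List.insertBy]
  | y :: ys, hp, hx => by
    rw [List.pairwise_cons] at hp
    by_cases h : pvLtB data x y = true
    · have hxy : pvR data x y := (pvLtB_iff data x y).mp h
      have : PySem.List.insertBy (pvLtB data) x (y :: ys) = x :: y :: ys := by
        simp [PySem.List.insertBy, h]
      rw [this, List.pairwise_cons]
      refine ⟨?_, List.pairwise_cons.mpr hp⟩
      intro z hz
      rcases List.mem_cons.mp hz with rfl | hz
      · exact hxy
      · have := hp.1 z hz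
        unfold pvR at *; omega
    · have hyx : pvR data y x := by
        have hne : x ≠ y := hx y (List.mem_cons_self ..)
        have h2 : ¬ pvR data x y := fun hc => h ((pvLtB_iff data x y).mpr hc)
        unfold pvR at *
        omega
      have : PySem.List.insertBy (pvLtB data) x (y :: ys) =
          y :: PySem.List.insertBy (pvLtB data) x ys := by
        simp [PySem.List.insertBy, h]
      rw [this, List.pairwise_cons]
      constructor
      · intro z hz
        rcases (PySem.List.insertBy_mem_iff _ _ _ _).mp hz with rfl | hz
        · exact hyx
        · exact hp.1 z hz
      · exact insertBy_pairwise_R data x ys hp.2 (fun y hy => hx y (List.mem_cons_of_mem _ hy))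

lemma foldl_insertBy_pairwise (data : List Int) :
    ∀ (xs acc : List Int), acc.Pairwise (pvR data) → xs.Nodup → (∀ x ∈ xs, x ∉ acc) →
    (xs.foldl (fun acc x => PySem.List.insertBy (pvLtB data) x acc) acc).Pairwise (pvR data)
  | [], acc, hacc, _, _ => hacc
  | x :: xs, acc, hacc, hnd, hdisj => by
    rw [List.foldl_cons]
    have hnd' := List.nodup_cons.mp hnd
    refine foldl_insertBy_pairwise data xs _ ?_ hnd'.2 ?_
    · exact insertBy_pairwise_R data x acc hacc
        (fun y hy hxy => hdisj x (List.mem_cons_self ..) (hxy ▸ hy))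
    · intro z hz hzin
      rcases (PySem.List.insertBy_mem_iff _ _ _ _).mp hzin with rfl | hzacc
      · exact hnd'.1 hz
      · exact hdisj z (List.mem_cons_of_mem _ hz) hzacc

lemma pvOrder_pairwise (data : List Int) : (pvOrder data).Pairwise (pvR data) := by
  rw [pvOrder_eq_foldl]
  exact foldl_insertBy_pairwise data _ [] (by simp) (PySem.List.nodup_pyRange_one _ _)
    (by simp)

lemma pvOrder_perm (data : List Int) :
    (pvOrder data).Perm (PySem.List.pyRange 0 (PySem.List.len data) 1) :=
  PySem.List.sorted2_perm ..

lemma mem_pvOrder (data : List Int) (i : Int) :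
    i ∈ pvOrder data ↔ 0 ≤ i ∧ i < (data.length : Int) := by
  rw [List.Perm.mem_iff (pvOrder_perm data), PySem.List.mem_pyRange_one, PySem.List.len_eq]

lemma pvOrder_nodup (data : List Int) : (pvOrder data).Nodup :=
  ((pvOrder_perm data).nodup_iff).mpr (PySem.List.nodup_pyRange_one _ _)

lemma pvD_ge (data : List Int) (lo : Int)
    (hmin : PySem.List.min? data (fun x => x) = some lo)
    (i : Int) (h0 : 0 ≤ i) (h1 : i < (data.length : Int)) : lo ≤ pvD data i := by
  have hmem : pvD data i ∈ data := by
    rw [pvD, PySem.List.pyGetD_eq_getElem data 0 h0 h1]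
    exact List.getElem_mem _
  exact PySem.List.min?_isMin hmin _ hmem

-- the inner scan never rises to v while only smaller allowed values pass
lemma fold_below (data idx : List Int) (v : Int) :
    ∀ (L : List Int) (st : Int × Int), st.2 < v →
    (∀ i ∈ L, i ∉ idx → pvD data i < v) →
    (L.foldl (pvStepA data idx) st).2 < v
  | [], st, hst, _ => hst
  | i :: L, st, hst, hL => by
    rw [List.foldl_cons]
    refine fold_below data idx v L _ ?_ (fun j hj => hL j (List.mem_cons_of_mem _ hj))
    unfold pvStepA
    split
    · next h => exact hL i (List.mem_cons_self ..) h.2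
    · exact hst

-- once the scan holds (j, v) and nothing allowed is larger, it stays there
lemma fold_fix (data idx : List Int) (j v : Int) :
    ∀ (L : List Int), (∀ i ∈ L, i ∉ idx → pvD data i ≤ v) →
    L.foldl (pvStepA data idx) (j, v) = (j, v)
  | [], _ => rfl
  | i :: L, hL => by
    rw [List.foldl_cons]
    have : pvStepA data idx (j, v) i = (j, v) := by
      unfold pvStepA
      split
      · next h =>
        exact absurd (hL i (List.mem_cons_self ..) h.2) (by have := h.1; unfold pvD at *; omega)
      · rfl
    rw [this]
    exact fold_fix data idx j v L (fun k hk => hL k (List.mem_cons_of_mem _ hk))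

-- the inner scan returns the allowed index j that is strictly best
lemma inner_eq (data idx : List Int) (j m0 : Int)
    (h0 : 0 ≤ j) (h1 : j < (data.length : Int)) (hj : j ∉ idx)
    (hbelow : ∀ i : Int, 0 ≤ i → i < (data.length : Int) → i ∉ idx → i < j → pvD data i < pvD data j)
    (hle : ∀ i : Int, 0 ≤ i → i < (data.length : Int) → i ∉ idx → pvD data i ≤ pvD data j)
    (hinit : m0 < pvD data j) :
    (PySem.List.pyRange 0 (PySem.List.len data) 1).foldl (pvStepA data idx) (-1, m0)
      = (j, pvD data j) := by
  rw [PySem.List.len_eq]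
  rw [PySem.List.pyRange_one_append 0 j (data.length : Int) h0 (by omega)]
  rw [PySem.List.pyRange_one_cons h1]
  rw [List.foldl_append, List.foldl_cons]
  have hb : ((PySem.List.pyRange 0 j).foldl (pvStepA data idx) (-1, m0)).2 < pvD data j := by
    refine fold_below data idx (pvD data j) _ _ hinit ?_
    intro i hi hni
    have := PySem.List.mem_pyRange_one.mp hi
    exact hbelow i this.1 (by omega) hni this.2
  have hstep : pvStepA data idx ((PySem.List.pyRange 0 j).foldl (pvStepA data idx) (-1, m0)) j
      = (j, pvD data j) := by
    unfold pvStepA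
    rw [if_pos ⟨by unfold pvD at hb; exact hb, hj⟩]
    rfl
  rw [hstep]
  refine fold_fix data idx j (pvD data j) _ ?_
  intro i hi hni
  have := PySem.List.mem_pyRange_one.mp hi
  exact hle i (by omega) this.2 hni

lemma order_rel (data : List Int) {k q : Nat} (hk : k < q) (hq : q < (pvOrder data).length) :
    pvR data (pvOrder data)[k] (pvOrder data)[q] :=
  List.pairwise_iff_getElem.mp (pvOrder_pairwise data) k q (by omega) hq hk

-- an index of the order that escapes take k sits at position ≥ k
lemma not_take_pos (data : List Int) (k : Nat) (i : Int)
    (hi : i ∈ pvOrder data) (hni : i ∉ (pvOrder data).take k) :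
    ∃ q : Nat, ∃ hq : q < (pvOrder data).length, k ≤ q ∧ (pvOrder data)[q] = i := by
  rcases List.getElem_of_mem hi with ⟨q, hq, hget⟩
  refine ⟨q, hq, ?_, hget⟩
  by_contra h
  exact hni (hget ▸ List.mem_take_iff_getElem.mpr ⟨q, by omega, rfl⟩)

-- every position before the cut satisfies lo < value, every one after fails it
lemma pvG_le_length (data : List Int) (lo : Int) : pvG data lo ≤ (pvOrder data).length :=
  (List.takeWhile_prefix _).length_le

lemma before_cut (data : List Int) (lo : Int) {q : Nat} (hq : q < pvG data lo) :
    lo < pvD data ((pvOrder data)[q]'(lt_of_lt_of_le hq (pvG_le_length data lo))) := by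
  have hpre : (pvOrder data).takeWhile (fun i => decide (lo < pvD data i)) <+: pvOrder data :=
    List.takeWhile_prefix _
  have hget := hpre.getElem (i := q) hq
  have hmem : ((pvOrder data).takeWhile (fun i => decide (lo < pvD data i)))[q]'hq ∈
      (pvOrder data).takeWhile (fun i => decide (lo < pvD data i)) := List.getElem_mem hq
  have hsat := List.mem_takeWhile_imp hmem
  rw [hget] at hsat
  simpa using hsat

lemma after_cut (data : List Int) (lo : Int) {q : Nat}
    (hg : pvG data lo ≤ q) (hq : q < (pvOrder data).length) :
    pvD data (pvOrder data)[q] ≤ lo := by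
  set p : Int → Bool := fun i => decide (lo < pvD data i) with hp
  have hsplit : (pvOrder data).takeWhile p ++ (pvOrder data).dropWhile p = pvOrder data :=
    List.takeWhile_append_dropWhile
  have hlen : ((pvOrder data).takeWhile p).length = pvG data lo := rfl
  have hdw_ne : (pvOrder data).dropWhile p ≠ [] := by
    intro hnil
    have : (pvOrder data).length = pvG data lo := by
      conv_lhs => rw [← hsplit]
      simp [hnil, hlen]
    omega
  have hhead : p (((pvOrder data).dropWhile p).head hdw_ne) = false :=
    List.head_dropWhile_not p hdw_ne
  have hglen : pvG data lo < (pvOrder data).length := by omega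
  have hg0 : (pvOrder data)[pvG data lo]? = ((pvOrder data).dropWhile p).head? := by
    conv_lhs => rw [← hsplit]
    rw [List.getElem?_append_right (by omega)]
    rw [hlen, Nat.sub_self, ← List.head?_eq_getElem?]
  have hg1 : (pvOrder data)[pvG data lo]'hglen = ((pvOrder data).dropWhile p).head hdw_ne := by
    have := hg0
    rw [List.getElem?_eq_getElem hglen, List.head?_eq_some_head hdw_ne] at this
    exact Option.some.inj this
  have hgfail : p ((pvOrder data)[pvG data lo]'hglen) = false :=
    (congrArg p hg1).trans hhead
  have hglo : ¬ lo < pvD data ((pvOrder data)[pvG data lo]'hglen) := by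
    simpa [hp] using hgfail
  rcases Nat.eq_or_lt_of_le hg with hqeq | hlt
  · subst hqeq; omega
  · have := order_rel data hlt hq
    unfold pvR at this
    omega

-- A's loop, started on a prefix of the order, walks down the order until the cut
lemma loop_eq (data : List Int) (lo : Int)
    (hmin : PySem.List.min? data (fun x => x) = some lo) :
    ∀ (c k : Nat), k ≤ pvG data lo → pvG data lo < (pvOrder data).length →
    pvLoopA data (lo - 1) c ((pvOrder data).take k)
      = (pvOrder data).take (min (k + c) (pvG data lo))
  | 0, k, hk, _ => by
    rw [pvLoopA]
    congr 1
    omega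
  | Nat.succ c, k, hk, hglen => by
    have hklen : k < (pvOrder data).length := by omega
    set j := (pvOrder data)[k] with hj
    have hjmem : j ∈ pvOrder data := List.getElem_mem _
    have hjrange := (mem_pvOrder data j).mp hjmem
    have hjnt : j ∉ (pvOrder data).take k := by
      intro hmem
      rcases List.mem_take_iff_getElem.mp hmem with ⟨q, hq, hget⟩
      have : q = k := ((pvOrder_nodup data).getElem_inj_iff).mp hget
      omega
    have hrel : ∀ i : Int, 0 ≤ i → i < (data.length : Int) → i ∉ (pvOrder data).take k →
        i ≠ j → pvR data j i := by
      intro i h0 h1 hni hne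
      have hi : i ∈ pvOrder data := (mem_pvOrder data i).mpr ⟨h0, h1⟩
      rcases not_take_pos data k i hi hni with ⟨q, hq, hkq, hget⟩
      have hkq' : k < q := by
        rcases Nat.eq_or_lt_of_le hkq with hqeq | h
        · subst hqeq
          exact absurd (hj.trans hget).symm hne
        · exact h
      have := order_rel data hkq' hq
      rwa [hget] at this
    have hle : ∀ i : Int, 0 ≤ i → i < (data.length : Int) → i ∉ (pvOrder data).take k →
        pvD data i ≤ pvD data j := by
      intro i h0 h1 hni
      by_cases hne : i = j
      · exact le_of_eq (by rw [hne])
      · have := hrel i h0 h1 hni hne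
        unfold pvR at this; omega
    have hbelow : ∀ i : Int, 0 ≤ i → i < (data.length : Int) → i ∉ (pvOrder data).take k →
        i < j → pvD data i < pvD data j := by
      intro i h0 h1 hni hij
      have := hrel i h0 h1 hni (by omega)
      unfold pvR at this; omega
    have hjge : lo ≤ pvD data j := pvD_ge data lo hmin j hjrange.1 hjrange.2
    have hinner : (PySem.List.pyRange 0 (PySem.List.len data) 1).foldl
        (pvStepA data ((pvOrder data).take k)) (-1, lo - 1) = (j, pvD data j) :=
      inner_eq data _ j (lo - 1) hjrange.1 hjrange.2 hjnt hbelow hle (by omega)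
    rw [pvLoopA]
    simp only [hinner]
    rcases Nat.eq_or_lt_of_le hk with hkeq | hklt
    · -- at the cut: the best remaining value equals lo, nothing is appended
      have hfail : pvD data j ≤ lo := after_cut data lo (le_of_eq hkeq.symm) hklen
      have hjlo : pvD data j = lo := le_antisymm hfail hjge
      rw [if_neg (by omega)]
      rw [loop_eq data lo hmin c k hk hglen]
      congr 1
      omega
    · -- before the cut: the best remaining value exceeds lo, its index is appended
      have hjgt : lo < pvD data j := before_cut data lo hklt
      rw [if_pos (by omega)]
      have htake : (pvOrder data).take k ++ [j] = (pvOrder data).take (k + 1) := by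
        rw [List.take_add_one, hj, List.getElem?_eq_getElem hklen]
        rfl
      rw [htake, loop_eq data lo hmin c (k + 1) (by omega) hglen]
      congr 1
      omega

-- the cut is strictly inside the order: some position holds a minimum of data
lemma pvG_lt_length (data : List Int) (lo : Int)
    (hmin : PySem.List.min? data (fun x => x) = some lo) :
    pvG data lo < (pvOrder data).length := by
  have hlomem : lo ∈ data := PySem.List.min?_mem hmin
  rcases List.getElem_of_mem hlomem with ⟨t, ht, hget⟩
  have hmem : (t : Int) ∈ pvOrder data := by
    rw [mem_pvOrder]
    constructor <;> omega
  have hdt : pvD data (t : Int) = lo := by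
    rw [pvD, PySem.List.pyGetD_eq_getElem data 0 (by omega) (by exact_mod_cast ht)]
    simpa using hget
  rcases List.getElem_of_mem hmem with ⟨q, hq, hgett⟩
  by_contra h
  have hG : pvG data lo = (pvOrder data).length := le_antisymm (pvG_le_length data lo) (by omega)
  have := before_cut data lo (q := q) (by omega)
  rw [hgett, hdt] at this
  omega

-- both results are the first count entries of the good prefix of the order
lemma take_order_eq (data : List Int) (lo : Int) (c : Nat) :
    (pvOrder data).take (min c (pvG data lo))
      = ((pvOrder data).takeWhile (fun i => decide (lo < pvD data i))).take c := by
  set p : Int → Bool := fun i => decide (lo < pvD data i) with hp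
  have hsplit : pvOrder data = (pvOrder data).takeWhile p ++ (pvOrder data).dropWhile p :=
    List.takeWhile_append_dropWhile.symm
  have hlen : ((pvOrder data).takeWhile p).length = pvG data lo := rfl
  conv_lhs => rw [hsplit]
  rw [List.take_append]
  have h1 : min c (pvG data lo) - ((pvOrder data).takeWhile p).length = 0 := by
    rw [hlen]; omega
  rw [h1, List.take_zero, List.append_nil]
  rw [List.take_eq_take_iff, hlen]
  omega

lemma filter_take_eq (data : List Int) (lo : Int) (c : Nat) :
    ((pvOrder data).take c).filter (fun i => decide (lo < pvD data i))
      = ((pvOrder data).takeWhile (fun i => decide (lo < pvD data i))).take c := by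
  set p : Int → Bool := fun i => decide (lo < pvD data i) with hp
  have hsplit : pvOrder data = (pvOrder data).takeWhile p ++ (pvOrder data).dropWhile p :=
    List.takeWhile_append_dropWhile.symm
  conv_lhs => rw [hsplit]
  rw [List.take_append, List.filter_append]
  have h1 : (((pvOrder data).takeWhile p).take c).filter p = ((pvOrder data).takeWhile p).take c :=
    List.filter_eq_self.mpr (fun a ha => List.mem_takeWhile_imp (List.mem_of_mem_take ha))
  have h2 : ((((pvOrder data).dropWhile p).take (c - ((pvOrder data).takeWhile p).length)).filter p)
      = [] := by
    refine List.filter_eq_nil_iff.mpr ?_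
    intro a ha
    have hadw : a ∈ (pvOrder data).dropWhile p := List.mem_of_mem_take ha
    rcases List.getElem_of_mem hadw with ⟨q, hq, hget⟩
    have hlen : ((pvOrder data).takeWhile p).length = pvG data lo := rfl
    have hlen2 : (pvOrder data).length
        = pvG data lo + ((pvOrder data).dropWhile p).length := by
      conv_lhs => rw [hsplit]
      rw [List.length_append, hlen]
    have hgeta? : (pvOrder data)[pvG data lo + q]? = some a := by
      conv_lhs => rw [hsplit]
      rw [List.getElem?_append_right (by omega)]
      rw [hlen, Nat.add_sub_cancel_left, List.getElem?_eq_getElem hq, hget]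
    have hgeta : (pvOrder data)[pvG data lo + q]'(by omega) = a := by
      rw [List.getElem?_eq_getElem (by omega : pvG data lo + q < (pvOrder data).length)] at hgeta?
      exact Option.some.inj hgeta?
    have := after_cut data lo (q := pvG data lo + q) (by omega) (by omega)
    rw [hgeta] at this
    simp [hp]
    omega
  rw [h1, h2, List.append_nil]

theorem list_indices_max_without_min_spec : Claim_equal_list_indices_max_without_min := by
  intro data count _ hpre
  obtain ⟨hne, hcnt⟩ := hpre
  unfold Spec_list_indices_max_without_min
  unfold list_indices_max_without_min list_indices_max_without_min_alt
  rw [PySem.List.len_eq]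
  rw [if_neg (by omega), if_neg (by omega)]
  rcases hlo : PySem.List.min? data (fun x => x) with _ | lo
  · exact absurd ((PySem.List.min?_eq_none_iff data _).mp hlo) hne
  · simp only
    have hglen := pvG_lt_length data lo hlo
    have hA : pvLoopA data (lo - 1) count.toNat []
        = (pvOrder data).take (min count.toNat (pvG data lo)) := by
      have := loop_eq data lo hlo count.toNat 0 (Nat.zero_le _) hglen
      simpa using this
    rw [hA]
    rw [PySem.List.slice_to _ (le_max_right _ _)]
    have hmax : (max count 0).toNat = count.toNat := by omega
    rw [hmax]
    rw [take_order_eq data lo count.toNat]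
    rw [← filter_take_eq data lo count.toNat]
    rfl
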